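-- pv_equiv track=rewrite | github.com/cookie0271/continual-learning | visual/visual_plt_lambda.py | find_task_boundaries
-- ===== SOURCE A (Python) =====
-- def find_task_boundaries(steps, tasks):
--     boundaries = []
--     if not steps:
--         return boundaries
--     last_task = tasks[0]
--     last_step = steps[0]
--     boundaries.append((last_task, last_step))
--     for step, task in zip(steps, tasks):
--         if task != last_task:
--             boundaries.append((task, step))
--             last_task = task
--     return boundaries
-- ===== SOURCE B (Python) =====
-- def find_task_boundaries(steps, tasks):
--     pairs = list(zip(steps, tasks))
--     n = len(pairs)
--     out = []
--     i = 0
--     while i < n: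
--         step0, task0 = pairs[i]
--         out.append((task0, step0))
--         i += 1
--         while i < n and pairs[i][1] == task0:
--             i += 1
--     return out
-- ===== Notes on version B (the rewrite author's own statement) =====
-- stated objective: idiomatic
-- what changed: B groups the zipped (step, task) pairs into maximal runs of equal task (a run scanner with an inner skip loop emitting each run's first step) instead of A's single pass maintaining a last_task accumulator with a special-cased first entry and conditional appends; where A raises IndexError (steps nonempty, tasks empty) Pre_ excludes the input.
import Mathlib
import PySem

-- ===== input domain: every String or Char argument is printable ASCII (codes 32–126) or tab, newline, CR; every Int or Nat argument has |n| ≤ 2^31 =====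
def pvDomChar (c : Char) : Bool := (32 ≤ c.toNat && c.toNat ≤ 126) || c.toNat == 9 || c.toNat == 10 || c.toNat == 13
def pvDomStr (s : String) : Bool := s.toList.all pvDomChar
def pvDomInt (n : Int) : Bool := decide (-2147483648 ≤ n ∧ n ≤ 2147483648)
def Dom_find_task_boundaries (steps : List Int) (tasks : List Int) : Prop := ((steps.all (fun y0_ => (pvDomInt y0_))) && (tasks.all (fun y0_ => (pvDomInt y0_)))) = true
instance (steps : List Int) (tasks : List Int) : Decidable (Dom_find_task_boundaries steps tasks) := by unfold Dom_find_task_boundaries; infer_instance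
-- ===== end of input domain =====

-- B replaces A's last_task-accumulator pass by a groupby-style run scanner over
-- the zipped pairs (idiomatic/alternative decomposition); return values agree
-- wherever A returns (Pre_ excludes only the inputs where A raises IndexError).


-- ===== PORT A =====
def find_task_boundaries (steps : List Int) (tasks : List Int) : List (Int × Int) :=
  if steps = [] then []
  else
    match PySem.List.pyGet? tasks 0, PySem.List.pyGet? steps 0 with
    | some last_task, some last_step =>
      -- boundaries = [(last_task, last_step)]; loop over zip(steps, tasks)
      ((List.zip steps tasks).foldl
        (fun (acc : List (Int × Int) × Int) (p : Int × Int) =>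
          if p.2 ≠ acc.2 then (acc.1 ++ [(p.2, p.1)], p.2) else acc)
        ([(last_task, last_step)], last_task)).1
    | _, _ => []  -- tasks[0] raises IndexError in Python; outside Pre_

-- ===== PORT B =====
-- Source B's while loops over pairs, as one structural recursion: pvSkip task0 ps is
-- the inner loop skipping pairs whose task equals task0; leaving it re-enters the
-- outer loop, which emits the run head and continues.
def pvSkip (task0 : Int) : List (Int × Int) → List (Int × Int)
  | [] => []
  | (s, t) :: rest => if t == task0 then pvSkip task0 rest else (t, s) :: pvSkip t rest

def find_task_boundaries_alt (steps : List Int) (tasks : List Int) : List (Int × Int) :=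
  match List.zip steps tasks with
  | [] => []
  | (step0, task0) :: rest => (task0, step0) :: pvSkip task0 rest

-- ===== PRECONDITION & SPEC =====
-- Pre_ excludes exactly the inputs where A raises IndexError (steps nonempty, tasks empty)
def Pre_find_task_boundaries (steps : List Int) (tasks : List Int) : Prop :=
  steps = [] ∨ tasks ≠ []
instance (steps : List Int) (tasks : List Int) : Decidable (Pre_find_task_boundaries steps tasks) := by unfold Pre_find_task_boundaries; infer_instance

def pvWitness_find_task_boundaries : List Int × List Int := ([0, 1, 2], [5, 5, 6])

def Spec_find_task_boundaries (steps : List Int) (tasks : List Int) (out : List (Int × Int)) : Prop := out = find_task_boundaries_alt steps tasks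
instance (steps : List Int) (tasks : List Int) (out : List (Int × Int)) : Decidable (Spec_find_task_boundaries steps tasks out) := by unfold Spec_find_task_boundaries; infer_instance

-- ===== CLAIM =====
def Claim_equal_find_task_boundaries : Prop := ∀ (steps : List Int) (tasks : List Int), Dom_find_task_boundaries steps tasks → Pre_find_task_boundaries steps tasks → Spec_find_task_boundaries steps tasks (find_task_boundaries steps tasks)

-- ===== LEMMAS AND PROOFS =====
-- A's loop, started with buffer buf and current last_task, appends exactly pvSkip last l.
theorem pvFoldA_eq (l : List (Int × Int)) : ∀ (buf : List (Int × Int)) (last : Int),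
    (l.foldl (fun (acc : List (Int × Int) × Int) (p : Int × Int) =>
        if p.2 = acc.2 then acc else (acc.1 ++ [(p.2, p.1)], p.2)) (buf, last)).1
      = buf ++ pvSkip last l := by
  induction l with
  | nil => intro buf last; simp [pvSkip]
  | cons p rest ih =>
      intro buf last
      obtain ⟨s, t⟩ := p
      by_cases h : t = last
      · simp only [List.foldl_cons]
        rw [if_pos (by simp [h])]
        rw [ih]
        simp [pvSkip, h]
      · simp only [List.foldl_cons]
        rw [if_neg (by simp [h])]
        rw [ih]
        simp [pvSkip, h]

-- ===== VERDICT =====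
theorem find_task_boundaries_spec : Claim_equal_find_task_boundaries := by
  intro steps tasks _ hpre
  unfold Spec_find_task_boundaries find_task_boundaries find_task_boundaries_alt
  match steps, tasks with
  | [], _ => simp
  | s0 :: srest, [] =>
      rcases hpre with h | h
      · exact absurd h (by simp)
      · exact absurd rfl h
  | s0 :: srest, t0 :: trest =>
      simp only [PySem.List.pyGet?, PySem.List.pyIdx?]
      norm_num
      rw [if_neg (show ¬(s0 :: srest = []) by simp)]
      rw [pvFoldA_eq]
      simp
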